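-- pv_equiv track=rewrite | github.com/dianaagl/kumir1 | Addons/convertor/src/translator_service/c_plus_plus.py | __make_name
-- ===== SOURCE A (Python) =====
-- def __make_name(name,capitalize_first):
--     new_name = ""
--     capitalize_next = capitalize_first
--     for c in name:
--         if c!="_":
--             if capitalize_next:
--                 new_name += c.upper()
--                 capitalize_next = False
--             else:
--                 new_name += c
--         else:
--             capitalize_next = True
--     return new_name
-- ===== SOURCE B (Python) =====
-- def __make_name(name, capitalize_first):
--     parts = name.split('_')
--     pieces = []
--     for i, part in enumerate(parts):
--         if (i > 0 or capitalize_first) and part: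
--             pieces.append(part[0].upper() + part[1:])
--         else:
--             pieces.append(part)
--     return "".join(pieces)
-- ===== Notes on version B (the rewrite author's own statement) =====
-- stated objective: idiomatic
-- what changed: Replaces the per-character loop carrying a capitalize_next flag with a split on '_' into segments, capitalizing the first character of each segment (the first segment only when capitalize_first) and joining.
import Mathlib
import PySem

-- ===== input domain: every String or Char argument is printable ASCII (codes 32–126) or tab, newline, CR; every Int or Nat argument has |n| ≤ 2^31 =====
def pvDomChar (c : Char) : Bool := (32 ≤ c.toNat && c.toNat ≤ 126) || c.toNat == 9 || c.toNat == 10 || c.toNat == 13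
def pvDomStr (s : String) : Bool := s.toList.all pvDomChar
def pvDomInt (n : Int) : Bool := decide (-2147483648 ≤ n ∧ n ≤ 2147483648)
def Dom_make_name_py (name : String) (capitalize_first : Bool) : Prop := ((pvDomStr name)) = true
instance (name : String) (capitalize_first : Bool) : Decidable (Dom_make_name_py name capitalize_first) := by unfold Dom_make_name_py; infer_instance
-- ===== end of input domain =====

-- B rebuilds the name from the segments of split('_') instead of scanning characters with a flag; objective: more idiomatic.

-- ===== PORT A =====
-- the body of A's for-loop: one character applied to the state (new_name, capitalize_next)
def aStep (st : List Char × Bool) (c : Char) : List Char × Bool :=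
  if c ≠ '_' then
    if st.2 then (st.1 ++ [PySem.Chars.upperChar c], false)
    else (st.1 ++ [c], st.2)
  else (st.1, true)

def make_name_py (name : String) (capitalize_first : Bool) : String :=
  String.mk ((name.toList.foldl aStep ([], capitalize_first)).1)

-- ===== PORT B =====
-- part[0].upper() + part[1:] (Source B only applies it to non-empty parts)
def capPart (part : List Char) : List Char :=
  match part with
  | [] => []
  | c :: rest => PySem.Chars.upperChar c :: rest

def make_name_py_alt (name : String) (capitalize_first : Bool) : String :=
  String.mk (PySem.Chars.join []
    ((PySem.List.enumerate (PySem.Chars.splitOn name.toList ['_'])).map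
      (fun p => if (decide (0 < p.1) || capitalize_first) && !p.2.isEmpty then capPart p.2 else p.2)))

-- ===== PRECONDITION & SPEC =====
def Spec_make_name_py (name : String) (capitalize_first : Bool) (out : String) : Prop := out = make_name_py_alt name capitalize_first
instance (name : String) (capitalize_first : Bool) (out : String) : Decidable (Spec_make_name_py name capitalize_first out) := by unfold Spec_make_name_py; infer_instance

-- ===== CLAIM (what is proved, stated in full; the proofs are below) =====
def Claim_equal_make_name_py : Prop := ∀ (name : String) (capitalize_first : Bool), Dom_make_name_py name capitalize_first → Spec_make_name_py name capitalize_first (make_name_py name capitalize_first)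

-- ===== LEMMAS AND PROOFS =====

-- structural version of Python's split('_')
def mySplit (pre : List Char) : List Char → List (List Char)
  | [] => [pre]
  | c :: rest => if c = '_' then pre :: mySplit [] rest else mySplit (pre ++ [c]) rest

-- structural version of A's loop (the characters it emits after the already-built prefix)
def aAux : List Char → Bool → List Char
  | [], _ => []
  | c :: cs, f =>
    if c = '_' then aAux cs true
    else if f then PySem.Chars.upperChar c :: aAux cs false else c :: aAux cs f

-- B's value on a split-list
def render (f : Bool) : List (List Char) → List Char
  | [] => []
  | p :: ps => (if f then capPart p else p) ++ (ps.map capPart).flatten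

theorem foldl_aAux (cs : List Char) : ∀ (acc : List Char) (f : Bool),
    (cs.foldl aStep (acc, f)).1 = acc ++ aAux cs f := by
  induction cs with
  | nil => intro acc f; simp [aAux]
  | cons c cs ih =>
    intro acc f
    rw [List.foldl_cons]
    by_cases hc : c = '_'
    · rw [show aStep (acc, f) c = (acc, true) from by simp [aStep, hc]]
      rw [ih]; simp [aAux, hc]
    · cases f with
      | true =>
        rw [show aStep (acc, true) c = (acc ++ [PySem.Chars.upperChar c], false) from by simp [aStep, hc]]
        rw [ih]; simp [aAux, hc]
      | false =>
        rw [show aStep (acc, false) c = (acc ++ [c], false) from by simp [aStep, hc]]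
        rw [ih]; simp [aAux, hc]

theorem go_eq_mySplit (fuel : Nat) : ∀ (l cur : List Char) (acc : List (List Char)),
    l.length < fuel →
    PySem.Chars.splitOn.go ['_'] fuel l cur acc = acc.reverse ++ mySplit cur.reverse l := by
  induction fuel with
  | zero => intro l cur acc h; omega
  | succ fuel ih =>
    intro l cur acc h
    cases l with
    | nil => simp [PySem.Chars.splitOn.go, mySplit]
    | cons c rest =>
      by_cases hc : c = '_'
      · have hp : List.isPrefixOf ['_'] (c :: rest) = true := by
          simp [List.isPrefixOf, hc]
        simp only [PySem.Chars.splitOn.go, hp, if_pos]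
        rw [show List.drop (['_'] : List Char).length (c :: rest) = rest by simp]
        rw [ih rest [] (cur.reverse :: acc) (by simp at h ⊢; omega)]
        simp [mySplit, hc]
      · have hp : List.isPrefixOf ['_'] (c :: rest) = false := by
          simp [List.isPrefixOf]; exact fun h' => hc h'.symm
        simp only [PySem.Chars.splitOn.go, hp, Bool.false_eq_true, if_false]
        rw [ih rest (c :: cur) acc (by simp at h ⊢; omega)]
        simp [mySplit, hc]

theorem splitOn_eq_mySplit (cs : List Char) :
    PySem.Chars.splitOn cs ['_'] = mySplit [] cs := by
  have := go_eq_mySplit (cs.length + 1) cs [] [] (by omega)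
  simpa [PySem.Chars.splitOn] using this

theorem mySplit_shape (cs : List Char) : ∀ (pre : List Char),
    ∃ h t, mySplit pre cs = (pre ++ h) :: t ∧ mySplit [] cs = h :: t := by
  induction cs with
  | nil => intro pre; exact ⟨[], [], by simp [mySplit], by simp [mySplit]⟩
  | cons c cs ih =>
    intro pre
    by_cases hc : c = '_'
    · exact ⟨[], mySplit [] cs, by simp [mySplit, hc], by simp [mySplit, hc]⟩
    · obtain ⟨h, t, h1, h2⟩ := ih (pre ++ [c])
      obtain ⟨h', t', h1', h2'⟩ := ih [c]
      have heq : h' :: t' = h :: t := h2'.symm.trans h2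
      have eh : h' = h := by injection heq
      have et : t' = t := by injection heq
      refine ⟨c :: h, t, ?_, ?_⟩
      · simp [mySplit, hc]; simpa using h1
      · simp [mySplit, hc]; rw [h1']; simp [eh, et]

theorem render_true (ps : List (List Char)) :
    render true ps = (ps.map capPart).flatten := by
  cases ps <;> simp [render]

theorem aAux_render (cs : List Char) : ∀ (f : Bool),
    aAux cs f = render f (mySplit [] cs) := by
  induction cs with
  | nil => intro f; cases f <;> simp [aAux, mySplit, render, capPart]
  | cons c cs ih =>
    intro f
    by_cases hc : c = '_'
    · rw [show aAux (c :: cs) f = aAux cs true by simp [aAux, hc]]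
      rw [ih true, render_true]
      cases f <;> simp [mySplit, hc, render, capPart]
    · obtain ⟨h, t, h1, h2⟩ := mySplit_shape cs [c]
      have hsp : mySplit [] (c :: cs) = (c :: h) :: t := by
        simp [mySplit, hc]; simpa using h1
      rw [hsp]
      cases f with
      | false =>
        rw [show aAux (c :: cs) false = c :: aAux cs false by simp [aAux, hc]]
        rw [ih false, h2]; simp [render]
      | true =>
        rw [show aAux (c :: cs) true = PySem.Chars.upperChar c :: aAux cs false by simp [aAux, hc]]
        rw [ih false, h2]; simp [render, capPart]

theorem enum_map_capPart (cf : Bool) (ps : List (List Char)) : ∀ (s : Int), 1 ≤ s →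
    (PySem.List.enumerate ps s).map
      (fun p => if (decide (0 < p.1) || cf) && !p.2.isEmpty then capPart p.2 else p.2)
      = ps.map capPart := by
  induction ps with
  | nil => intro s _; simp [PySem.List.enumerate_nil]
  | cons p ps ih =>
    intro s hs
    rw [PySem.List.enumerate_cons, List.map_cons, List.map_cons, ih (s + 1) (by omega)]
    congr 1
    have h0 : decide (0 < s) = true := by simp; omega
    cases p with
    | nil => simp [capPart]
    | cons a b => simp [h0, capPart]

theorem join_nil_flatten (xs : List (List Char)) :
    PySem.Chars.join [] xs = xs.flatten := by
  induction xs with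
  | nil => rfl
  | cons h t ih =>
    cases t with
    | nil => simp [PySem.Chars.join, List.intercalate]
    | cons h' t' =>
      simp [PySem.Chars.join, List.intercalate] at *
      simpa using ih

theorem alt_eq_render (name : String) (cf : Bool) :
    make_name_py_alt name cf = String.mk (render cf (mySplit [] name.toList)) := by
  unfold make_name_py_alt
  rw [splitOn_eq_mySplit]
  obtain ⟨h, t, _, h2⟩ := mySplit_shape name.toList []
  rw [h2]
  rw [PySem.List.enumerate_cons, List.map_cons]
  rw [show (0 : Int) + 1 = 1 from rfl]
  rw [enum_map_capPart cf t 1 (by omega)]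
  rw [join_nil_flatten]
  congr 1
  simp only [List.flatten_cons, render]
  congr 1
  cases h with
  | nil => simp [capPart]
  | cons a b => simp [capPart]

-- ===== VERDICT (by name: the statement is the Claim_ definition above) =====
theorem make_name_py_spec : Claim_equal_make_name_py := by
  intro name cf _
  unfold Spec_make_name_py
  rw [alt_eq_render]
  unfold make_name_py
  rw [foldl_aAux, List.nil_append, aAux_render]
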